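-- pv_equiv track=rewrite | github.com/davidbhan/practice | hackerrank/artificial_intelligence/bot_clean_large.py | shift_to_human_readable
-- ===== SOURCE A (Python) =====
-- def shift_to_human_readable(shift_r, shift_c):
--     output = ''
--
--     while(shift_r != 0):
--         if shift_r > 0:
--             output += 'DOWN\n'
--             shift_r -= 1
--         else:
--             output += 'UP\n'
--             shift_r += 1
--
--     while(shift_c != 0):
--         if shift_c > 0:
--             output += 'RIGHT\n'
--             shift_c -= 1
--         else:
--             output += 'LEFT\n'
--             shift_c += 1
--
--     output += 'CLEAN\n'
--
--     return output
-- ===== SOURCE B (Python) =====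
-- def shift_to_human_readable(shift_r, shift_c):
--     row = ('DOWN\n' if shift_r > 0 else 'UP\n') * abs(shift_r)
--     col = ('RIGHT\n' if shift_c > 0 else 'LEFT\n') * abs(shift_c)
--     return row + col + 'CLEAN\n'
-- ===== Notes on version B (the rewrite author's own statement) =====
-- stated objective: simpler
-- what changed: Replaces the two per-unit while-loops with a closed-form construction: each direction string is repeated abs(shift) times via string multiplication, then concatenated with 'CLEAN\n'.
import Mathlib
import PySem

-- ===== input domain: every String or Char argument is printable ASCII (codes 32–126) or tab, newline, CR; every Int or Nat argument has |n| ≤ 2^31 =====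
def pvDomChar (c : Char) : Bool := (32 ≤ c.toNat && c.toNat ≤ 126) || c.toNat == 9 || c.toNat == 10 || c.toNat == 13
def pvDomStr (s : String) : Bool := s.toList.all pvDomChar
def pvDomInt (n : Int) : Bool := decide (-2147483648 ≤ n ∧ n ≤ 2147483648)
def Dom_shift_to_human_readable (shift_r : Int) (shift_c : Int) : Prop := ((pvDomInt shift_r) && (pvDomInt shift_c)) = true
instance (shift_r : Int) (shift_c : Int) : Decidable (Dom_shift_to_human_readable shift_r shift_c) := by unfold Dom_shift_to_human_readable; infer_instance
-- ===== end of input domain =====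

-- B replaces the two per-unit while-loops with closed-form string repetition by sign and magnitude (simpler).


-- ===== PORT A =====
-- while shift_r != 0: append DOWN/UP and step toward 0
def pvLoopR (shift_r : Int) (output : String) : String :=
  if shift_r = 0 then output
  else if shift_r > 0 then pvLoopR (shift_r - 1) (output ++ "DOWN\n")
  else pvLoopR (shift_r + 1) (output ++ "UP\n")
termination_by shift_r.natAbs
decreasing_by all_goals omega

-- while shift_c != 0: append RIGHT/LEFT and step toward 0
def pvLoopC (shift_c : Int) (output : String) : String :=
  if shift_c = 0 then output
  else if shift_c > 0 then pvLoopC (shift_c - 1) (output ++ "RIGHT\n")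
  else pvLoopC (shift_c + 1) (output ++ "LEFT\n")
termination_by shift_c.natAbs
decreasing_by all_goals omega

def shift_to_human_readable (shift_r : Int) (shift_c : Int) : String :=
  pvLoopC shift_c (pvLoopR shift_r "") ++ "CLEAN\n"

-- ===== PORT B =====
-- s * n (Python string repetition)
def pvRep (s : String) : Nat -> String
  | 0 => ""
  | n + 1 => s ++ pvRep s n

def shift_to_human_readable_alt (shift_r : Int) (shift_c : Int) : String :=
  pvRep (if shift_r > 0 then "DOWN\n" else "UP\n") shift_r.natAbs ++
  pvRep (if shift_c > 0 then "RIGHT\n" else "LEFT\n") shift_c.natAbs ++ "CLEAN\n"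

-- ===== PRECONDITION & SPEC =====
def Spec_shift_to_human_readable (shift_r : Int) (shift_c : Int) (out : String) : Prop := out = shift_to_human_readable_alt shift_r shift_c
instance (shift_r : Int) (shift_c : Int) (out : String) : Decidable (Spec_shift_to_human_readable shift_r shift_c out) := by unfold Spec_shift_to_human_readable; infer_instance

-- ===== CLAIM (what is proved, stated in full; the proofs are below) =====
def Claim_equal_shift_to_human_readable : Prop := ∀ (shift_r : Int) (shift_c : Int), Dom_shift_to_human_readable shift_r shift_c → Spec_shift_to_human_readable shift_r shift_c (shift_to_human_readable shift_r shift_c)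

-- ===== LEMMAS AND PROOFS =====

theorem pvRep_append (s : String) (n : Nat) (out : String) :
    out ++ pvRep s (n + 1) = (out ++ s) ++ pvRep s n := by
  simp [pvRep, String.append_assoc]

theorem pvLoopR_pos (n : Nat) (out : String) :
    pvLoopR (n : Int) out = out ++ pvRep "DOWN\n" n := by
  induction n generalizing out with
  | zero => simp [pvLoopR, pvRep]
  | succ k ih =>
    rw [pvLoopR]
    have h0 : ((k + 1 : Nat) : Int) ≠ 0 := by omega
    have h1 : ((k + 1 : Nat) : Int) > 0 := by omega
    have h2 : ((k + 1 : Nat) : Int) - 1 = (k : Int) := by omega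
    simp only [h0, h1, h2, if_pos, if_false]
    rw [ih, pvRep_append]

theorem pvLoopR_neg (n : Nat) (out : String) :
    pvLoopR (-(n : Int)) out = out ++ pvRep "UP\n" n := by
  induction n generalizing out with
  | zero => simp [pvLoopR, pvRep]
  | succ k ih =>
    rw [pvLoopR]
    have h0 : (-((k + 1 : Nat) : Int)) ≠ 0 := by omega
    have h1 : ¬ ((-((k + 1 : Nat) : Int)) > 0) := by omega
    have h2 : (-((k + 1 : Nat) : Int)) + 1 = -(k : Int) := by omega
    simp only [h0, h1, h2, if_false]
    rw [ih, pvRep_append]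

theorem pvLoopC_pos (n : Nat) (out : String) :
    pvLoopC (n : Int) out = out ++ pvRep "RIGHT\n" n := by
  induction n generalizing out with
  | zero => simp [pvLoopC, pvRep]
  | succ k ih =>
    rw [pvLoopC]
    have h0 : ((k + 1 : Nat) : Int) ≠ 0 := by omega
    have h1 : ((k + 1 : Nat) : Int) > 0 := by omega
    have h2 : ((k + 1 : Nat) : Int) - 1 = (k : Int) := by omega
    simp only [h0, h1, h2, if_pos, if_false]
    rw [ih, pvRep_append]

theorem pvLoopC_neg (n : Nat) (out : String) :
    pvLoopC (-(n : Int)) out = out ++ pvRep "LEFT\n" n := by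
  induction n generalizing out with
  | zero => simp [pvLoopC, pvRep]
  | succ k ih =>
    rw [pvLoopC]
    have h0 : (-((k + 1 : Nat) : Int)) ≠ 0 := by omega
    have h1 : ¬ ((-((k + 1 : Nat) : Int)) > 0) := by omega
    have h2 : (-((k + 1 : Nat) : Int)) + 1 = -(k : Int) := by omega
    simp only [h0, h1, h2, if_false]
    rw [ih, pvRep_append]

theorem pvLoopR_eq (r : Int) :
    pvLoopR r "" = pvRep (if r > 0 then "DOWN\n" else "UP\n") r.natAbs := by
  rcases Int.natAbs_eq r with h | h
  · by_cases hp : r > 0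
    · simp only [hp, if_pos]
      rw [h, pvLoopR_pos]
      simp [Int.natAbs_abs]
    · have : r = 0 := by omega
      subst this
      simp [pvLoopR, pvRep]
  · have hp : ¬ (r > 0) := by omega
    simp only [hp, if_false]
    rw [h, pvLoopR_neg]
    simp [Int.natAbs_abs]

theorem pvLoopC_eq (c : Int) (out : String) :
    pvLoopC c out = out ++ pvRep (if c > 0 then "RIGHT\n" else "LEFT\n") c.natAbs := by
  rcases Int.natAbs_eq c with h | h
  · by_cases hp : c > 0
    · simp only [hp, if_pos]
      rw [h, pvLoopC_pos]
      simp [Int.natAbs_abs]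
    · have : c = 0 := by omega
      subst this
      simp [pvLoopC, pvRep]
  · have hp : ¬ (c > 0) := by omega
    simp only [hp]
    rw [h, pvLoopC_neg]
    simp [Int.natAbs_abs]

-- ===== VERDICT (by name: the statement is the Claim_ definition above) =====
theorem shift_to_human_readable_spec : Claim_equal_shift_to_human_readable := by
  intro r c _
  unfold Spec_shift_to_human_readable shift_to_human_readable shift_to_human_readable_alt
  rw [pvLoopC_eq, pvLoopR_eq, String.append_assoc]
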